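-- pv_equiv track=rewrite | github.com/rocdawn12/double_cross_resonance_gate | util.py | _get_del_idx
-- ===== SOURCE A (Python) =====
-- def _get_del_idx(N, qs):
--     qsn = list(set(range(N)) - set(qs))
--     dl = []
--     for i in range(2**N):
--         r = 0
--         for q in qsn:
--             if i & (1<<q):
--                 r = 1
--                 break
--         if r:
--             dl.append(i)
--     return dl
-- ===== SOURCE B (Python) =====
-- def _get_del_idx(N, qs):
--     mask = 0
--     for q in range(N):
--         if q not in qs:
--             mask |= 1 << q
--     return [i for i in range(2**N) if i & mask]
-- ===== Notes on version B (the rewrite author's own statement) =====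
-- stated objective: alternative
-- what changed: B precomputes one bitmask of the non-qs positions and tests each index with a single i & mask, replacing A's inner per-index loop over the complement list; it trades the per-index scan for one bitwise test.
import Mathlib
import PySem

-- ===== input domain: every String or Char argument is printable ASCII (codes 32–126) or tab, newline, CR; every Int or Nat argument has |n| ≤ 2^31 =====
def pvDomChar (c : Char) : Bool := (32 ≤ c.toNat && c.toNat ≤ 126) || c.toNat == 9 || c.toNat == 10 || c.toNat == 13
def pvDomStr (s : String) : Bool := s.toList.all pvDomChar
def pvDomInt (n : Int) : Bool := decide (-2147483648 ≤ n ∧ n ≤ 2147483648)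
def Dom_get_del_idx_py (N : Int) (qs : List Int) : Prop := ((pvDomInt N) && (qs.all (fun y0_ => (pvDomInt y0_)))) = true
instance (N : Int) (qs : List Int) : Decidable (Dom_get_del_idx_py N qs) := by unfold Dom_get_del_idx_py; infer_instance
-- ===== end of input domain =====

-- B precomputes a single bitmask of the non-qs bit positions; testing i & mask replaces A's inner per-index loop (alternative formulation).

-- ===== PORT A =====
-- qsn = list(set(range(N)) - set(qs)); the result does not depend on the set's
-- iteration order (only on whether SOME q in qsn has its bit set in i).
def get_del_idx_py (N : Int) (qs : List Int) : List Int :=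
  let qsn : List Int := PySem.Set.diff (PySem.Set.ofList (PySem.List.pyRange 0 N 1)) qs
  (PySem.List.pyRange 0 ((2 : Int) ^ N.toNat) 1).foldl (fun dl i =>
    let r : Int := qsn.foldl (fun r q =>
      if r = 1 then r  -- break: once r is set the loop body no longer runs
      else if PySem.Int.band i (1 <<< q.toNat) ≠ 0 then 1 else r) 0
    if r ≠ 0 then dl ++ [i] else dl) []

-- ===== PORT B =====
def get_del_idx_py_alt (N : Int) (qs : List Int) : List Int :=
  let mask : Int := (PySem.List.pyRange 0 N 1).foldl (fun m q =>
    if q ∈ qs then m else PySem.Int.bor m (1 <<< q.toNat)) 0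
  (PySem.List.pyRange 0 ((2 : Int) ^ N.toNat) 1).filter (fun i => PySem.Int.band i mask ≠ 0)

-- ===== PRECONDITION & SPEC =====
-- Pre_ excludes N < 0, where Python's 2**N is a float and range(2**N) raises TypeError.
def Pre_get_del_idx_py (N : Int) (qs : List Int) : Prop := 0 ≤ N
instance (N : Int) (qs : List Int) : Decidable (Pre_get_del_idx_py N qs) := by unfold Pre_get_del_idx_py; infer_instance
def pvWitness_get_del_idx_py : Int × List Int := (2, [0])
def Spec_get_del_idx_py (N : Int) (qs : List Int) (out : List Int) : Prop := out = get_del_idx_py_alt N qs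
instance (N : Int) (qs : List Int) (out : List Int) : Decidable (Spec_get_del_idx_py N qs out) := by unfold Spec_get_del_idx_py; infer_instance

-- ===== CLAIM (what is proved, stated in full; the proofs are below) =====
def Claim_equal_get_del_idx_py : Prop := ∀ (N : Int) (qs : List Int), Dom_get_del_idx_py N qs → Pre_get_del_idx_py N qs → Spec_get_del_idx_py N qs (get_del_idx_py N qs)

-- ===== LEMMAS AND PROOFS =====

-- x | y = 0 iff both are 0 (Nat)
theorem pv_lor_eq_zero (u v : Nat) : u ||| v = 0 ↔ u = 0 ∧ v = 0 := by
  constructor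
  · intro h
    constructor <;>
    · apply Nat.eq_of_testBit_eq
      intro b
      have hb := congrArg (fun n => Nat.testBit n b) h
      simp only [Nat.testBit_or, Nat.zero_testBit, Bool.or_eq_false_iff] at hb
      simp [hb.1, hb.2]
  · rintro ⟨rfl, rfl⟩; rfl

theorem pv_one_shl_nonneg (k : Nat) : (0 : Int) ≤ ((1 <<< k : Nat) : Int) :=
  Int.natCast_nonneg _

-- i & (a | b) ≠ 0 iff i & a ≠ 0 or i & b ≠ 0, for nonnegative arguments
theorem pv_band_bor_ne {i a b : Int} (hi : 0 ≤ i) (ha : 0 ≤ a) (hb : 0 ≤ b) :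
    PySem.Int.band i (PySem.Int.bor a b) ≠ 0 ↔
      PySem.Int.band i a ≠ 0 ∨ PySem.Int.band i b ≠ 0 := by
  rw [PySem.Int.bor_of_nonneg ha hb,
      PySem.Int.band_of_nonneg hi (by positivity),
      PySem.Int.band_of_nonneg hi ha, PySem.Int.band_of_nonneg hi hb]
  simp only [ne_eq, Int.natCast_eq_zero, Int.toNat_natCast]
  rw [Nat.and_or_distrib_left, pv_lor_eq_zero]
  tauto

-- B's masked test, unrolled over the list of bit positions
theorem pv_mask_ne (i : Int) (hi : 0 ≤ i) :
    ∀ (L : List Int) (m : Int), 0 ≤ m →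
      (PySem.Int.band i (L.foldl (fun m q => PySem.Int.bor m (1 <<< q.toNat)) m) ≠ 0 ↔
        PySem.Int.band i m ≠ 0 ∨ ∃ q ∈ L, PySem.Int.band i ((1 <<< q.toNat : Nat) : Int) ≠ 0) := by
  intro L
  induction L with
  | nil => intro m _; simp
  | cons q L ih =>
    intro m hm
    have hsh := pv_one_shl_nonneg q.toNat
    have hb : 0 ≤ PySem.Int.bor m (1 <<< q.toNat) := by
      rw [PySem.Int.bor_of_nonneg hm hsh]; positivity
    simp only [List.foldl_cons]
    rw [ih _ hb, pv_band_bor_ne hi hm hsh]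
    simp only [List.mem_cons]
    constructor
    · rintro (⟨h | h⟩ | ⟨q', hq', h⟩)
      · exact Or.inl h
      · exact Or.inr ⟨q, Or.inl rfl, h⟩
      · exact Or.inr ⟨q', Or.inr hq', h⟩
    · rintro (h | ⟨q', (rfl | hq'), h⟩)
      · exact Or.inl (Or.inl h)
      · exact Or.inl (Or.inr h)
      · exact Or.inr ⟨q', hq', h⟩

-- A's inner flag loop: once r = 1 it stays 1
theorem pv_inner_one (i : Int) (L : List Int) :
    L.foldl (fun r q => if r = 1 then r
      else if PySem.Int.band i (1 <<< q.toNat) ≠ 0 then 1 else r) (1 : Int) = 1 := by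
  induction L with
  | nil => rfl
  | cons q L ih => simpa using ih

-- A's inner flag loop from 0 is nonzero iff some listed bit is set in i
theorem pv_inner_ne (i : Int) (L : List Int) :
    L.foldl (fun r q => if r = 1 then r
      else if PySem.Int.band i (1 <<< q.toNat) ≠ 0 then 1 else r) (0 : Int) ≠ 0 ↔
      ∃ q ∈ L, PySem.Int.band i ((1 <<< q.toNat : Nat) : Int) ≠ 0 := by
  induction L with
  | nil => simp
  | cons q L ih =>
    simp only [List.foldl_cons, List.mem_cons]
    by_cases h : PySem.Int.band i (1 <<< q.toNat) ≠ 0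
    · simp only [if_neg (by norm_num : ¬ (0 : Int) = 1), if_pos h, pv_inner_one]
      constructor
      · intro _; exact ⟨q, Or.inl rfl, h⟩
      · intro _; norm_num
    · simp only [if_neg (by norm_num : ¬ (0 : Int) = 1), if_neg h]
      rw [ih]
      constructor
      · rintro ⟨q', hq', hb⟩; exact ⟨q', Or.inr hq', hb⟩
      · rintro ⟨q', (rfl | hq'), hb⟩
        · exact absurd hb h
        · exact ⟨q', hq', hb⟩

-- appending under a condition is filtering
theorem pv_foldl_append_filter (cond : Int → Prop) [DecidablePred cond] :
    ∀ (l acc : List Int),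
      l.foldl (fun dl i => if cond i then dl ++ [i] else dl) acc =
        acc ++ l.filter (fun i => cond i) := by
  intro l
  induction l with
  | nil => simp
  | cons x l ih =>
    intro acc
    by_cases h : cond x <;> simp [h, ih]

-- skipping under a condition is folding over the filtered list
theorem pv_foldl_skip_filter (qs : List Int) (f : Int → Int → Int) :
    ∀ (l : List Int) (m : Int),
      l.foldl (fun m q => if q ∈ qs then m else f m q) m =
        (l.filter (fun q => ¬ q ∈ qs)).foldl f m := by
  intro l
  induction l with
  | nil => intro m; rfl
  | cons x l ih =>
    intro m
    by_cases h : x ∈ qs <;> simp [h, ih]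

-- set(range(N)) - set(qs) is range(N) filtered by non-membership in qs
theorem pv_qsn_eq (N : Int) (qs : List Int) :
    PySem.Set.diff (PySem.Set.ofList (PySem.List.pyRange 0 N 1)) qs =
      (PySem.List.pyRange 0 N 1).filter (fun q => ¬ q ∈ qs) := by
  rw [PySem.Set.ofList_eq_self_of_nodup _ (PySem.List.nodup_pyRange_one 0 N)]
  simp [PySem.Set.diff, PySem.Set.contains]

-- ===== VERDICT (by name: the statement is the Claim_ definition above) =====
theorem get_del_idx_py_spec : Claim_equal_get_del_idx_py := by
  intro N qs _ _
  unfold Spec_get_del_idx_py get_del_idx_py get_del_idx_py_alt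
  rw [pv_qsn_eq, pv_foldl_skip_filter,
      pv_foldl_append_filter
        (fun i => ((PySem.List.pyRange 0 N 1).filter (fun q => ¬ q ∈ qs)).foldl
          (fun r q => if r = 1 then r
            else if PySem.Int.band i (1 <<< q.toNat) ≠ 0 then 1 else r) (0 : Int) ≠ 0)]
  simp only [List.nil_append]
  apply List.filter_congr
  intro i hi
  have h0i : (0 : Int) ≤ i := (PySem.List.mem_pyRange_one.mp hi).1
  have := pv_mask_ne i h0i ((PySem.List.pyRange 0 N 1).filter (fun q => ¬ q ∈ qs)) 0 le_rfl
  simp only [PySem.Int.band_zero, ne_eq, not_true_eq_false, false_or] at this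
  apply decide_eq_decide.mpr
  rw [pv_inner_ne i]
  exact this.symm
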